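-- pv_equiv track=rewrite | github.com/hendrikhuwy-lgtm/Investment-Sample | backend/app/v2/surfaces/changes/contract_builder.py | _net_impact
-- ===== SOURCE A (Python) =====
-- def _net_impact(event_types: list[str]) -> str:
--     normalized = {str(event_type or "").strip().lower() for event_type in event_types}
--     if {"truth_change", "boundary_change", "forecast_trigger_threshold_crossed"} & normalized:
--         return "material"
--     if {"forecast_support_weakened", "forecast_support_strengthened", "forecast_anomaly_opened", "forecast_anomaly_resolved"} & normalized:
--         return "minor"
--     if normalized and normalized <= {"interpretation_change"}:
--         return "minor"
--     if normalized:
--         return "minor"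
--     return "none"
-- ===== SOURCE B (Python) =====
-- _MATERIAL = {"truth_change", "boundary_change", "forecast_trigger_threshold_crossed"}
--
-- def _net_impact(event_types: list[str]) -> str:
--     # Single pass: return "material" on the first material event type;
--     # any other element just marks the input as non-empty ("minor").
--     seen = False
--     for event_type in event_types:
--         if str(event_type or "").strip().lower() in _MATERIAL:
--             return "material"
--         seen = True
--     return "minor" if seen else "none"
-- ===== Notes on version B (the rewrite author's own statement) =====
-- stated objective: simpler
-- what changed: B replaces A's set comprehension plus three set-intersection/subset branches (two of which are redundant) with one short-circuiting pass that returns 'material' on the first material event type and otherwise reduces to 'minor' iff the list is non-empty.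
import Mathlib
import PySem

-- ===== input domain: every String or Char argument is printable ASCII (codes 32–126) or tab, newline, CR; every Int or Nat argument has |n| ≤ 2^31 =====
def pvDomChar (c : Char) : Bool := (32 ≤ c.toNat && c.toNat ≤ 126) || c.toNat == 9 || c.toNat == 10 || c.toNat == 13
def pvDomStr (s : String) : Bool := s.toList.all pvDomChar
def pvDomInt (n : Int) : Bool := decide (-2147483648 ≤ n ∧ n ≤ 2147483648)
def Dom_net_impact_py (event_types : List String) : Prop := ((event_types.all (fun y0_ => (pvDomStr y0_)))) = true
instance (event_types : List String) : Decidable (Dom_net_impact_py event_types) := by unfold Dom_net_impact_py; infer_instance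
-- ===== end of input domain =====

-- B replaces A's set comprehension and three set-intersection/subset branches with one
-- short-circuiting pass over the list (objective: simpler).

-- ===== PORT A =====
-- str(event_type or "").strip().lower()  ('s or ""' is s itself for strings)
def pvNorm (s : String) : String := PySem.Str.lower (PySem.Str.strip s)

def pvMaterialSet : PySem.Set String :=
  PySem.Set.ofList ["truth_change", "boundary_change", "forecast_trigger_threshold_crossed"]

def pvMinorSet : PySem.Set String :=
  PySem.Set.ofList ["forecast_support_weakened", "forecast_support_strengthened",
                    "forecast_anomaly_opened", "forecast_anomaly_resolved"]

def net_impact_py (event_types : List String) : String :=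
  let normalized : PySem.Set String :=
    PySem.Set.ofList (event_types.map (fun event_type => pvNorm event_type))
  if PySem.Set.inter pvMaterialSet normalized ≠ [] then "material"
  else if PySem.Set.inter pvMinorSet normalized ≠ [] then "minor"
  else if normalized ≠ [] ∧ PySem.Set.issubset normalized (PySem.Set.ofList ["interpretation_change"]) = true then "minor"
  else if normalized ≠ [] then "minor"
  else "none"

-- ===== PORT B =====
def pvMaterialList : List String :=
  ["truth_change", "boundary_change", "forecast_trigger_threshold_crossed"]

-- the for-loop of Source B, carrying the 'seen' flag
def netImpactLoop : List String → Bool → String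
  | [], seen => if seen then "minor" else "none"
  | event_type :: rest, _ =>
      if pvMaterialList.contains (PySem.Str.lower (PySem.Str.strip event_type)) then "material"
      else netImpactLoop rest true

def net_impact_py_alt (event_types : List String) : String :=
  netImpactLoop event_types false

-- ===== PRECONDITION & SPEC =====
def Spec_net_impact_py (event_types : List String) (out : String) : Prop := out = net_impact_py_alt event_types
instance (event_types : List String) (out : String) : Decidable (Spec_net_impact_py event_types out) := by unfold Spec_net_impact_py; infer_instance

-- ===== CLAIM (what is proved, stated in full; the proofs are below) =====
def Claim_equal_net_impact_py : Prop := ∀ (event_types : List String), Dom_net_impact_py event_types → Spec_net_impact_py event_types (net_impact_py event_types)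

-- ===== LEMMAS AND PROOFS =====

-- "some element of ets normalizes into the set s" characterizes the nonemptiness of A's intersections
lemma inter_ne_nil_iff (s : List String) (ets : List String) :
    PySem.Set.inter (PySem.Set.ofList s) (PySem.Set.ofList (ets.map (fun e => pvNorm e))) ≠ [] ↔
      ∃ e ∈ ets, pvNorm e ∈ s := by
  constructor
  · intro h
    obtain ⟨x, hx⟩ := List.exists_mem_of_ne_nil _ h
    rw [PySem.Set.mem_inter, PySem.Set.mem_ofList, PySem.Set.mem_ofList, List.mem_map] at hx
    obtain ⟨hs, e, he, rfl⟩ := hx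
    exact ⟨e, he, hs⟩
  · rintro ⟨e, he, hs⟩ h
    have : pvNorm e ∈ PySem.Set.inter (PySem.Set.ofList s) (PySem.Set.ofList (ets.map (fun e => pvNorm e))) := by
      rw [PySem.Set.mem_inter, PySem.Set.mem_ofList, PySem.Set.mem_ofList, List.mem_map]
      exact ⟨hs, e, he, rfl⟩
    simp [h] at this

lemma ofList_map_ne_nil_iff (ets : List String) :
    PySem.Set.ofList (ets.map (fun e => pvNorm e)) ≠ [] ↔ ets ≠ [] := by
  cases ets with
  | nil => simp [PySem.Set.ofList]
  | cons e rest =>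
    simp only [ne_eq, not_iff_not]
    constructor
    · intro h
      have hmem : pvNorm e ∈ PySem.Set.ofList ((e :: rest).map (fun e => pvNorm e)) := by
        rw [PySem.Set.mem_ofList]; simp
      rw [h] at hmem
      exact absurd hmem (by simp)
    · intro h; exact absurd h (by simp)

lemma A_canonical (ets : List String) :
    net_impact_py ets =
      if ∃ e ∈ ets, pvNorm e ∈ pvMaterialList then "material"
      else if ets = [] then "none" else "minor" := by
  simp only [net_impact_py, pvMaterialSet, pvMinorSet]
  by_cases hm : ∃ e ∈ ets, pvNorm e ∈ pvMaterialList
  · have hm' : ∃ e ∈ ets, pvNorm e ∈ (["truth_change", "boundary_change", "forecast_trigger_threshold_crossed"] : List String) := hm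
    rw [if_pos ((inter_ne_nil_iff _ ets).mpr hm'), if_pos hm]
  · have hm' : ¬ ∃ e ∈ ets, pvNorm e ∈ (["truth_change", "boundary_change", "forecast_trigger_threshold_crossed"] : List String) := hm
    rw [if_neg (fun h => hm' ((inter_ne_nil_iff _ ets).mp h)), if_neg hm]
    by_cases he : ets = []
    · subst he
      simp [PySem.Set.ofList, PySem.Set.inter]
    · rw [if_neg he]
      split_ifs with h1 h2 h3
      · rfl
      · rfl
      · rfl
      · exact absurd ((ofList_map_ne_nil_iff ets).mpr he) h3

lemma B_loop_canonical (ets : List String) :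
    netImpactLoop ets true =
      if ∃ e ∈ ets, pvNorm e ∈ pvMaterialList then "material" else "minor" := by
  induction ets with
  | nil => simp [netImpactLoop]
  | cons e rest ih =>
    unfold netImpactLoop
    by_cases h : pvNorm e ∈ pvMaterialList
    · have : pvMaterialList.contains (PySem.Str.lower (PySem.Str.strip e)) = true := by
        rw [List.contains_iff_mem]; exact h
      rw [if_pos this, if_pos ⟨e, by simp, h⟩]
    · have : ¬ pvMaterialList.contains (PySem.Str.lower (PySem.Str.strip e)) = true := by
        rw [List.contains_iff_mem]; exact h
      rw [if_neg this, ih]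
      congr 1
      simp only [List.mem_cons, eq_iff_iff]
      constructor
      · rintro ⟨x, hx, hm⟩; exact ⟨x, Or.inr hx, hm⟩
      · rintro ⟨x, rfl | hx, hm⟩
        · exact absurd hm h
        · exact ⟨x, hx, hm⟩

lemma B_canonical (ets : List String) :
    net_impact_py_alt ets =
      if ∃ e ∈ ets, pvNorm e ∈ pvMaterialList then "material"
      else if ets = [] then "none" else "minor" := by
  unfold net_impact_py_alt
  cases ets with
  | nil => simp [netImpactLoop]
  | cons e rest =>
    unfold netImpactLoop
    by_cases h : pvNorm e ∈ pvMaterialList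
    · have : pvMaterialList.contains (PySem.Str.lower (PySem.Str.strip e)) = true := by
        rw [List.contains_iff_mem]; exact h
      rw [if_pos this, if_pos ⟨e, by simp, h⟩]
    · have hc : ¬ pvMaterialList.contains (PySem.Str.lower (PySem.Str.strip e)) = true := by
        rw [List.contains_iff_mem]; exact h
      rw [if_neg hc, B_loop_canonical, if_neg (by simp : ¬ (e :: rest) = [])]
      congr 1
      simp only [List.mem_cons, eq_iff_iff]
      constructor
      · rintro ⟨x, hx, hm⟩; exact ⟨x, Or.inr hx, hm⟩
      · rintro ⟨x, rfl | hx, hm⟩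
        · exact absurd hm h
        · exact ⟨x, hx, hm⟩

-- ===== VERDICT (by name: the statement is the Claim_ definition above) =====
theorem net_impact_py_spec : Claim_equal_net_impact_py := by
  intro ets _
  show net_impact_py ets = net_impact_py_alt ets
  rw [A_canonical, B_canonical]
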